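-- pv_equiv track=rewrite | github.com/tranphat180603/parameter-golf | records/track_10min_16mb/2026-04-09_SP8192_3LayerRecur_ParResid_QK525_LegalTTT/score_quant_sweeps.py | _family_for_overrides
-- ===== SOURCE A (Python) =====
-- def _family_for_overrides(overrides: tuple[str, ...]) -> str:
--     if not overrides:
--         return "baseline"
--     if all(".attn." in name for name in overrides):
--         return "attn"
--     if all(".mlp." in name for name in overrides):
--         return "mlp"
--     return "mixed"
-- ===== SOURCE B (Python) =====
-- def _family_for_overrides(overrides: tuple[str, ...]) -> str:
--     # Abstract each name to a label (has_attn, has_mlp), dedup into a set,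
--     # then decide the family by constant-size set inclusion.
--     kinds = {(".attn." in name, ".mlp." in name) for name in overrides}
--     if not kinds:
--         return "baseline"
--     if kinds <= {(True, True), (True, False)}:
--         return "attn"
--     if kinds <= {(True, True), (False, True)}:
--         return "mlp"
--     return "mixed"
-- ===== Notes on version B (the rewrite author's own statement) =====
-- stated objective: alternative
-- what changed: B abstracts each name to a (has_attn, has_mlp) label, collects the distinct labels into a set, and decides the family with constant-size set-inclusion tests, instead of A's staged all()-scans over the raw names.
import Mathlib
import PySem

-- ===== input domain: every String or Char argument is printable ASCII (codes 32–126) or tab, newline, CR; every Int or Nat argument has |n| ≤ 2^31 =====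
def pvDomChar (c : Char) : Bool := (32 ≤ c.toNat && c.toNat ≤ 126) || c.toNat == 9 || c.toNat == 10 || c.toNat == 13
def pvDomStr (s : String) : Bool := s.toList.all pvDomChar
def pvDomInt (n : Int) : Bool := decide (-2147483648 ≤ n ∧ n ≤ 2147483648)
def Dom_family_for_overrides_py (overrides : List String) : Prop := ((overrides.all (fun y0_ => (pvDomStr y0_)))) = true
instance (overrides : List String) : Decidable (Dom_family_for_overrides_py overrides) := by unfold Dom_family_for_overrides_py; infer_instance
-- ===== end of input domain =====

-- B abstracts each name to a (has_attn, has_mlp) label, dedups the labels into a set and decides by set inclusion (alternative decomposition, same cost).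


-- ===== PORT A =====
-- Transliteration of A: empty check, then two all() scans in order.
def family_for_overrides_py (overrides : List String) : String :=
  if overrides.isEmpty then "baseline"
  else if overrides.all (fun name => PySem.Str.isIn ".attn." name) then "attn"
  else if overrides.all (fun name => PySem.Str.isIn ".mlp." name) then "mlp"
  else "mixed"

-- ===== PORT B =====
-- Transliteration of B: set of per-name (has_attn, has_mlp) labels, then set-inclusion decision.
def family_for_overrides_py_alt (overrides : List String) : String :=
  let kinds : PySem.Set (Bool × Bool) :=
    PySem.Set.ofList (overrides.map
      (fun name => (PySem.Str.isIn ".attn." name, PySem.Str.isIn ".mlp." name)))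
  if kinds.isEmpty then "baseline"
  else if PySem.Set.issubset kinds [(true, true), (true, false)] then "attn"
  else if PySem.Set.issubset kinds [(true, true), (false, true)] then "mlp"
  else "mixed"

-- ===== PRECONDITION & SPEC =====
def Spec_family_for_overrides_py (overrides : List String) (out : String) : Prop := out = family_for_overrides_py_alt overrides
instance (overrides : List String) (out : String) : Decidable (Spec_family_for_overrides_py overrides out) := by unfold Spec_family_for_overrides_py; infer_instance

-- ===== CLAIM =====
def Claim_equal_family_for_overrides_py : Prop := ∀ (overrides : List String), Dom_family_for_overrides_py overrides → Spec_family_for_overrides_py overrides (family_for_overrides_py overrides)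

-- ===== LEMMAS AND PROOFS =====

-- set(xs) is empty iff xs is empty.
lemma pv_ofList_isEmpty {α : Type} [BEq α] [LawfulBEq α] (l : List α) :
    (PySem.Set.ofList l).isEmpty = l.isEmpty := by
  cases l with
  | nil => rfl
  | cons x t =>
    have hx : x ∈ PySem.Set.ofList (x :: t) :=
      (PySem.Set.mem_ofList _ _).2 (List.mem_cons_self ..)
    rw [Bool.eq_iff_iff, List.isEmpty_iff, List.isEmpty_iff]
    constructor
    · intro h; rw [h] at hx; exact absurd hx (List.not_mem_nil)
    · intro h; exact absurd h (List.cons_ne_nil _ _)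

-- The set of labels is empty iff the list of names is empty.
lemma pv_kinds_isEmpty (overrides : List String) :
    (PySem.Set.ofList (overrides.map
      (fun name => (PySem.Str.isIn ".attn." name, PySem.Str.isIn ".mlp." name)))).isEmpty
    = overrides.isEmpty := by
  rw [pv_ofList_isEmpty]; cases overrides <;> rfl

-- kinds ⊆ {labels whose first component is true} ⟺ every name contains ".attn." (and symmetrically).
lemma pv_issubset_fst (overrides : List String) :
    PySem.Set.issubset
      (PySem.Set.ofList (overrides.map
        (fun name => (PySem.Str.isIn ".attn." name, PySem.Str.isIn ".mlp." name))))
      [(true, true), (true, false)]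
    = overrides.all (fun name => PySem.Str.isIn ".attn." name) := by
  rw [Bool.eq_iff_iff, PySem.Set.issubset_iff, List.all_eq_true]
  constructor
  · intro h name hname
    have hmem := h _ ((PySem.Set.mem_ofList _ _).2 (List.mem_map_of_mem hname))
    simp only [List.mem_cons, List.not_mem_nil, or_false, Prod.mk.injEq] at hmem
    rcases hmem with ⟨h1, _⟩ | ⟨h1, _⟩ <;> exact h1
  · intro h x hx
    rcases List.mem_map.1 ((PySem.Set.mem_ofList _ _).1 hx) with ⟨name, hn, rfl⟩
    rw [h name hn]
    rcases PySem.Str.isIn ".mlp." name <;> simp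

lemma pv_issubset_snd (overrides : List String) :
    PySem.Set.issubset
      (PySem.Set.ofList (overrides.map
        (fun name => (PySem.Str.isIn ".attn." name, PySem.Str.isIn ".mlp." name))))
      [(true, true), (false, true)]
    = overrides.all (fun name => PySem.Str.isIn ".mlp." name) := by
  rw [Bool.eq_iff_iff, PySem.Set.issubset_iff, List.all_eq_true]
  constructor
  · intro h name hname
    have hmem := h _ ((PySem.Set.mem_ofList _ _).2 (List.mem_map_of_mem hname))
    simp only [List.mem_cons, List.not_mem_nil, or_false, Prod.mk.injEq] at hmem
    rcases hmem with ⟨_, h2⟩ | ⟨_, h2⟩ <;> exact h2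
  · intro h x hx
    rcases List.mem_map.1 ((PySem.Set.mem_ofList _ _).1 hx) with ⟨name, hn, rfl⟩
    rw [h name hn]
    rcases PySem.Str.isIn ".attn." name <;> simp

-- ===== VERDICT =====
theorem family_for_overrides_py_spec : Claim_equal_family_for_overrides_py := by
  intro overrides _
  unfold Spec_family_for_overrides_py family_for_overrides_py family_for_overrides_py_alt
  simp only [pv_kinds_isEmpty, pv_issubset_fst, pv_issubset_snd]
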